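-- pv_equiv track=rewrite | github.com/MrBrantCode/unitest_baseline | mut_generate/mist_train_cf/cf_4066/solution.py | remove_duplicates_reverse
-- ===== SOURCE A (Python) =====
-- def remove_duplicates_reverse(lst):
--     seen = set()
--     result = []
--
--     for i in range(len(lst)-1, -1, -1):
--         if lst[i] not in seen:
--             seen.add(lst[i])
--             result.append(lst[i])
--
--     return result
-- ===== SOURCE B (Python) =====
-- def remove_duplicates_reverse(lst):
--     last = {}
--     for i, x in enumerate(lst):
--         last[x] = i
--     result = [x for i, x in enumerate(lst) if last[x] == i]
--     return result[::-1]
-- ===== Notes on version B (the rewrite author's own statement) =====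
-- stated objective: alternative
-- what changed: Replaces the backward index loop with a seen-set by two forward passes: build a last-occurrence-index table, keep each element exactly at its last index, then reverse the kept list.
import Mathlib
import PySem

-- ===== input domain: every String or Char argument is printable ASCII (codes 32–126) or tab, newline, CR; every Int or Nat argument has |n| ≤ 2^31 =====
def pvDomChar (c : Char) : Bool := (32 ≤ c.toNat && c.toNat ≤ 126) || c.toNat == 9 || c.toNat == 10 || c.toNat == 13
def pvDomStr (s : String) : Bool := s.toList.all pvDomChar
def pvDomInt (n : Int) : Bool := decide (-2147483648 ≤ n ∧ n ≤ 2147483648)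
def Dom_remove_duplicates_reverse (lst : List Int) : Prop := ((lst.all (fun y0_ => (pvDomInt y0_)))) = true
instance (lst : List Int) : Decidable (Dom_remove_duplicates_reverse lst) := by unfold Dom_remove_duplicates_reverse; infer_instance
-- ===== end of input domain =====

-- B replaces A's backward index loop with a seen-set by two forward passes (last-occurrence index
-- table, then keep each element at its last index) followed by a reversal; alternative decomposition.

-- ===== PORT A =====
def remove_duplicates_reverse (lst : List Int) : List Int :=
  ((PySem.List.pyRange ((lst.length : Int) - 1) (-1) (-1)).foldl
    (fun (st : PySem.Set Int × List Int) i =>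
      if st.1.contains (PySem.List.pyGetD lst i 0) then st
      else (st.1.add (PySem.List.pyGetD lst i 0), st.2 ++ [PySem.List.pyGetD lst i 0]))
    (PySem.Set.empty, [])).2

-- ===== PORT B =====
def remove_duplicates_reverse_alt (lst : List Int) : List Int :=
  let last : PySem.Dict Int Int :=
    (PySem.List.enumerate lst 0).foldl (fun d p => PySem.Dict.insert d p.2 p.1) PySem.Dict.empty
  let result : List Int :=
    (PySem.List.enumerate lst 0).foldl
      (fun acc p => if PySem.Dict.get? last p.2 = some p.1 then acc ++ [p.2] else acc) []
  (PySem.List.slice? result none none (-1)).getD []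

-- ===== PRECONDITION & SPEC =====
def Spec_remove_duplicates_reverse (lst : List Int) (out : List Int) : Prop := out = remove_duplicates_reverse_alt lst
instance (lst : List Int) (out : List Int) : Decidable (Spec_remove_duplicates_reverse lst out) := by unfold Spec_remove_duplicates_reverse; infer_instance

-- ===== CLAIM (what is proved, stated in full; the proofs are below) =====
def Claim_equal_remove_duplicates_reverse : Prop := ∀ (lst : List Int), Dom_remove_duplicates_reverse lst → Spec_remove_duplicates_reverse lst (remove_duplicates_reverse lst)

-- ===== LEMMAS AND PROOFS =====

-- keep-last filter relative to a set t of values known to occur later: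
-- klf t xs keeps x at a position iff x occurs neither later in xs nor in t
def klf (t : List Int) : List Int → List Int
  | [] => []
  | x :: xs => if x ∈ xs ∨ x ∈ t then klf t xs else x :: klf t xs

-- first-occurrence dedup relative to an already-seen set (A's loop body, value level)
def ddf (s : PySem.Set Int) : List Int → List Int
  | [] => []
  | y :: ys => if s.contains y then ddf s ys else y :: ddf (s.add y) ys

-- B's last-occurrence-index table
def lastD (xs : List Int) : PySem.Dict Int Int :=
  (PySem.List.enumerate xs 0).foldl (fun d p => PySem.Dict.insert d p.2 p.1) PySem.Dict.empty

theorem klf_snoc (t : List Int) (xs : List Int) (y : Int) :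
    klf t (xs ++ [y]) = klf (y :: t) xs ++ (if y ∈ t then [] else [y]) := by
  induction xs generalizing t with
  | nil => simp [klf]
  | cons a xs ih =>
      simp only [List.cons_append, klf, List.mem_append, List.mem_cons]
      by_cases h : a ∈ xs ∨ a = y ∨ a ∈ t
      · rw [if_pos (by tauto), if_pos (by tauto), ih]
      · rw [if_neg (by tauto), if_neg (by tauto), ih, List.cons_append]

theorem klf_congr (t t' : List Int) (h : ∀ x, x ∈ t ↔ x ∈ t') (xs : List Int) :
    klf t xs = klf t' xs := by
  induction xs with
  | nil => rfl
  | cons a xs ih =>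
      simp only [klf, h a, ih]

theorem foldA (ys : List Int) (s : PySem.Set Int) (r : List Int) :
    (ys.foldl (fun (st : PySem.Set Int × List Int) v =>
        if st.1.contains v then st else (st.1.add v, st.2 ++ [v])) (s, r)).2
      = r ++ ddf s ys := by
  induction ys generalizing s r with
  | nil => simp [ddf]
  | cons y ys ih =>
      cases h : PySem.Set.contains s y with
      | true =>
          simp only [List.foldl_cons, ddf, h, if_true]
          exact ih s r
      | false =>
          simp only [List.foldl_cons, ddf, h]
          rw [ih]; simp

theorem foldl_countdown {β : Type} (f : β → Int → β) (d : Int) (xs : List Int) (init : β) :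
    (PySem.List.pyRange ((xs.length : Int) - 1) (-1) (-1)).foldl
        (fun acc j => f acc (PySem.List.pyGetD xs j d)) init
      = xs.reverse.foldl f init := by
  induction xs using List.reverseRecOn generalizing init with
  | nil => rw [PySem.List.pyRange_neg_one_eq_nil (by simp)]; simp
  | append_singleton xs y ih =>
      have hlen : ((xs ++ [y]).length : Int) - 1 = (xs.length : Int) := by
        push_cast [List.length_append, List.length_singleton]; ring
      rw [hlen, PySem.List.pyRange_neg_one_cons (by omega)]
      simp only [List.foldl_cons]
      have hy : PySem.List.pyGetD (xs ++ [y]) ((xs.length : Int)) d = y := by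
        rw [PySem.List.pyGetD_eq_getElem (xs ++ [y]) d (by omega)
              (by push_cast [List.length_append, List.length_singleton]; omega)]
        simp
      rw [hy]
      have hcong : ∀ (acc : β), ∀ j ∈ PySem.List.pyRange ((xs.length : Int) - 1) (-1) (-1),
          f acc (PySem.List.pyGetD (xs ++ [y]) j d) = f acc (PySem.List.pyGetD xs j d) := by
        intro acc j hj
        rw [PySem.List.mem_pyRange_neg_one] at hj
        congr 1
        rw [PySem.List.pyGetD_eq_getElem (xs ++ [y]) d (by omega)
              (by push_cast [List.length_append, List.length_singleton]; omega),
            PySem.List.pyGetD_eq_getElem xs d (by omega) (by omega)]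
        rw [List.getElem_append_left (by omega)]
      rw [PySem.List.foldl_congr_mem _ _ (fun acc j => f acc (PySem.List.pyGetD xs j d)) _ hcong]
      rw [ih]
      simp

theorem ddf_reverse (xs : List Int) : ∀ (s : PySem.Set Int) (t : List Int),
    (∀ x, s.contains x = true ↔ x ∈ t) → ddf s xs.reverse = (klf t xs).reverse := by
  induction xs using List.reverseRecOn with
  | nil => intro s t h; simp [ddf, klf]
  | append_singleton xs y ih =>
      intro s t h
      rw [List.reverse_append, klf_snoc]
      simp only [List.reverse_singleton, List.singleton_append, ddf, List.reverse_append]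
      by_cases hy : y ∈ t
      · rw [if_pos ((h y).mpr hy), if_pos hy]
        rw [ih s t h, klf_congr t (y :: t) (by
          intro x
          constructor
          · intro hx; exact List.mem_cons_of_mem _ hx
          · intro hx; rcases List.mem_cons.mp hx with rfl | hx; exacts [hy, hx])]
        simp
      · have hc : s.contains y = false := by
          cases hcc : s.contains y with
          | true => exact absurd ((h y).mp hcc) hy
          | false => rfl
        rw [hc, if_neg hy]
        rw [ih (s.add y) (y :: t) (by
          intro x
          rw [PySem.Set.contains_iff, PySem.Set.mem_add, List.mem_cons]
          rw [← PySem.Set.contains_iff, h x]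
          tauto)]
        simp

theorem lastD_snoc (xs : List Int) (y : Int) :
    lastD (xs ++ [y]) = (lastD xs).insert y (xs.length : Int) := by
  unfold lastD
  rw [PySem.List.enumerate_append, List.foldl_append]
  simp [PySem.List.enumerate_cons, PySem.List.enumerate_nil]

theorem resF_spec (xs : List Int) : ∀ (t : List Int) (d : PySem.Dict Int Int),
    (∀ x, x ∈ xs → x ∉ t → d.get? x = (lastD xs).get? x) →
    (∀ x, x ∈ t → ∃ j, d.get? x = some j ∧ (xs.length : Int) ≤ j) →
    (PySem.List.enumerate xs 0).foldl
        (fun acc p => if PySem.Dict.get? d p.2 = some p.1 then acc ++ [p.2] else acc) []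
      = klf t xs := by
  induction xs using List.reverseRecOn with
  | nil => intro t d _ _; simp [PySem.List.enumerate_nil, klf]
  | append_singleton xs y ih =>
      intro t d h1 h2
      rw [PySem.List.enumerate_append, List.foldl_append]
      have hy : ∀ x, x ∈ xs → x ∉ (y :: t) → d.get? x = (lastD xs).get? x := by
        intro x hx hxt
        rw [List.mem_cons, not_or] at hxt
        rw [h1 x (by simp [hx]) hxt.2, lastD_snoc,
            PySem.Dict.get?_insert_of_ne _ _ hxt.1]
      have hy2 : ∀ x, x ∈ (y :: t) → ∃ j, d.get? x = some j ∧ (xs.length : Int) ≤ j := by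
        intro x hx
        have hycase : ∃ j, d.get? y = some j ∧ (xs.length : Int) ≤ j := by
          by_cases hyt : y ∈ t
          · obtain ⟨j, hj, hjl⟩ := h2 y hyt
            push_cast [List.length_append, List.length_singleton] at hjl
            exact ⟨j, hj, by omega⟩
          · refine ⟨(xs.length : Int), ?_, le_refl _⟩
            rw [h1 y (by simp) hyt, lastD_snoc, PySem.Dict.get?_insert_self]
        rcases List.mem_cons.mp hx with hx | hx
        · rw [hx]; exact hycase
        · obtain ⟨j, hj, hjl⟩ := h2 x hx
          push_cast [List.length_append, List.length_singleton] at hjl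
          exact ⟨j, hj, by omega⟩
      rw [ih (y :: t) d hy hy2, klf_snoc]
      simp only [PySem.List.enumerate_cons, PySem.List.enumerate_nil, List.foldl_cons,
        List.foldl_nil, zero_add]
      by_cases hyt : y ∈ t
      · obtain ⟨j, hj, hjl⟩ := h2 y hyt
        push_cast [List.length_append, List.length_singleton] at hjl
        rw [if_neg (by rw [hj]; intro hc; rw [Option.some_inj] at hc; omega), if_pos hyt]
        simp
      · have hgy : d.get? y = some ((xs.length : Int)) := by
          rw [h1 y (by simp) hyt, lastD_snoc, PySem.Dict.get?_insert_self]
        rw [if_pos (by rw [hgy]), if_neg hyt]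

theorem A_eq (lst : List Int) : remove_duplicates_reverse lst = (klf [] lst).reverse := by
  unfold remove_duplicates_reverse
  rw [foldl_countdown
      (fun (st : PySem.Set Int × List Int) v =>
        if st.1.contains v then st else (st.1.add v, st.2 ++ [v])) 0 lst]
  rw [foldA]
  rw [ddf_reverse lst PySem.Set.empty []
      (by intro x; simp [PySem.Set.empty])]
  simp

theorem B_eq (lst : List Int) : remove_duplicates_reverse_alt lst = (klf [] lst).reverse := by
  simp only [remove_duplicates_reverse_alt]
  rw [PySem.List.slice?_none_none_neg_one, Option.getD_some]
  congr 1
  exact resF_spec lst [] (lastD lst) (fun x _ _ => rfl) (by simp)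

-- ===== VERDICT (by name: the statement is the Claim_ definition above) =====
theorem remove_duplicates_reverse_spec : Claim_equal_remove_duplicates_reverse := by
  intro lst _
  unfold Spec_remove_duplicates_reverse
  rw [A_eq, B_eq]
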